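-- pv_equiv track=rewrite | github.com/CodeMzt/sa | test/can/tools/analyze_logic2_digital_can.py | can_crc15
-- ===== SOURCE A (Python) =====
-- from typing import Dict, Iterable, List, Optional, Sequence, Tuple
--
-- def can_crc15(bits: Sequence[int]) -> int:
--     """Classical CAN CRC-15（poly=0x4599, init=0）."""
--     crc = 0
--     poly = 0x4599
--     for bit in bits:
--         msb = (crc >> 14) & 0x1
--         crc = ((crc << 1) & 0x7FFF)
--         if (msb ^ (bit & 0x1)) != 0:
--             crc ^= poly
--     return crc
-- ===== SOURCE B (Python) =====
-- def can_crc15(bits):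
--     """Classical CAN CRC-15 (poly=0x4599, init=0), table-driven: a 16-entry
--     nibble table is built once and the input is consumed four bits at a time;
--     leftover bits (len % 4) are fed one by one."""
--     poly = 0x4599
--     table = []
--     for n in range(16):
--         c = 0
--         for k in range(4):
--             msb = (c >> 14) & 0x1
--             c = (c << 1) & 0x7FFF
--             if (msb ^ ((n >> (3 - k)) & 0x1)) != 0:
--                 c ^= poly
--         table.append(c)
--     crc = 0
--     i = 0
--     m = len(bits) - 3
--     while i < m:
--         nib = ((bits[i] & 0x1) << 3) | ((bits[i + 1] & 0x1) << 2) | ((bits[i + 2] & 0x1) << 1) | (bits[i + 3] & 0x1)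
--         crc = ((crc << 4) & 0x7FFF) ^ table[((crc >> 11) ^ nib) & 0xF]
--         i += 4
--     for b in bits[i:]:
--         msb = (crc >> 14) & 0x1
--         crc = ((crc << 1) & 0x7FFF)
--         if (msb ^ (b & 0x1)) != 0:
--             crc ^= poly
--     return crc
-- ===== Notes on version B (the rewrite author's own statement) =====
-- stated objective: alternative
-- what changed: Replaced the per-bit CRC feedback loop by a table-driven algorithm: a 16-entry nibble table is precomputed and the input is consumed four bits per iteration (leftover bits fed singly).
import Mathlib
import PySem

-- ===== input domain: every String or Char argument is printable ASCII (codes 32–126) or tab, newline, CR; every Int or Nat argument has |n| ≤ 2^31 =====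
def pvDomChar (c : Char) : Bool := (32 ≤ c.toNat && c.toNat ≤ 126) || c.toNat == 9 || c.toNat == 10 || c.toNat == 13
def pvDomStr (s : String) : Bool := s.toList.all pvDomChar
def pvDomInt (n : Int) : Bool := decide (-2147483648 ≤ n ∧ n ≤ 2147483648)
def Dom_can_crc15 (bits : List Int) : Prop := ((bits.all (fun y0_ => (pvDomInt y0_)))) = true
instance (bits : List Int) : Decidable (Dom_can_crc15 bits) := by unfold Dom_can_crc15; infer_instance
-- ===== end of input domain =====

-- B re-implements the bit-at-a-time CAN CRC-15 as a table-driven algorithm (16-entry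
-- nibble table built once, input consumed four bits per iteration); objective: alternative
-- algorithm of the same exact behaviour.

-- ===== PORT A =====
-- the body of A's per-bit loop
def pvStepA (crc bit : Int) : Int :=
  let msb := PySem.Int.band (crc >>> (14:Nat)) 1
  let crc2 := PySem.Int.band (crc <<< (1:Nat)) 0x7FFF
  if PySem.Int.bxor msb (PySem.Int.band bit 1) ≠ 0 then PySem.Int.bxor crc2 0x4599 else crc2

def can_crc15 (bits : List Int) : Int := bits.foldl pvStepA 0

-- ===== PORT B =====
-- table[n] for one n: feed the 4 bits of n (MSB first) into a zero register
def pvTableEntry (n : Int) : Int :=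
  (List.range 4).foldl (fun c k =>
    let msb := PySem.Int.band (c >>> (14:Nat)) 1
    let c2 := PySem.Int.band (c <<< (1:Nat)) 0x7FFF
    if PySem.Int.bxor msb (PySem.Int.band (n >>> (3 - k)) 1) ≠ 0 then PySem.Int.bxor c2 0x4599 else c2) 0

def pvTable : List Int := (List.range 16).foldl (fun acc n => acc ++ [pvTableEntry n]) []

-- body of B's while loop: consume one 4-bit group
def pvNibStep (crc b0 b1 b2 b3 : Int) : Int :=
  let nib := PySem.Int.bor (PySem.Int.bor (PySem.Int.bor ((PySem.Int.band b0 1) <<< (3:Nat)) ((PySem.Int.band b1 1) <<< (2:Nat))) ((PySem.Int.band b2 1) <<< (1:Nat))) (PySem.Int.band b3 1)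
  PySem.Int.bxor (PySem.Int.band (crc <<< (4:Nat)) 0x7FFF)
    (PySem.List.pyGetD pvTable (PySem.Int.band (PySem.Int.bxor (crc >>> (11:Nat)) nib) 0xF) 0)

-- body of B's trailing per-bit loop
def pvStepB (crc bit : Int) : Int :=
  let msb := PySem.Int.band (crc >>> (14:Nat)) 1
  let crc2 := PySem.Int.band (crc <<< (1:Nat)) 0x7FFF
  if PySem.Int.bxor msb (PySem.Int.band bit 1) ≠ 0 then PySem.Int.bxor crc2 0x4599 else crc2

-- B's while loop (groups of four) followed by the trailing loop on the < 4 leftover bits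
def pvChunks : List Int → Int → Int
  | b0 :: b1 :: b2 :: b3 :: rest, crc => pvChunks rest (pvNibStep crc b0 b1 b2 b3)
  | rest, crc => rest.foldl pvStepB crc

def can_crc15_alt (bits : List Int) : Int := pvChunks bits 0

-- ===== PRECONDITION & SPEC =====
def Spec_can_crc15 (bits : List Int) (out : Int) : Prop := out = can_crc15_alt bits
instance (bits : List Int) (out : Int) : Decidable (Spec_can_crc15 bits out) := by unfold Spec_can_crc15; infer_instance

-- ===== CLAIM (what is proved, stated in full; the proofs are below) =====
def Claim_equal_can_crc15 : Prop := ∀ (bits : List Int), Dom_can_crc15 bits → Spec_can_crc15 bits (can_crc15 bits)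

-- ===== LEMMAS AND PROOFS =====

-- Nat-level model of the per-bit step
def stepN (x c : Nat) : Nat :=
  ((x <<< 1) &&& 32767) ^^^ (if ((x >>> 14) &&& 1) ^^^ c = 0 then 0 else 17817)

-- Nat-level table (the 16 register states after feeding each nibble into 0)
def tableN : List Nat :=
  [0, 17817, 20139, 2866, 22735, 7510, 5732, 21501, 29703, 12702, 15020, 32565, 11464, 26961, 25187, 10234]

-- Nat-level model of one 4-bit group step
def nibStepN (x v : Nat) : Nat :=
  ((x <<< 4) &&& 32767) ^^^ tableN.getD (((x >>> 11) ^^^ v) &&& 15) 0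

lemma xor_shiftLeft_distrib (a b k : Nat) : (a ^^^ b) <<< k = a <<< k ^^^ b <<< k := by
  apply Nat.eq_of_testBit_eq
  intro i
  simp [Nat.testBit_shiftLeft, Nat.testBit_xor]
  cases (decide (i ≥ k)) <;> simp

lemma xor_shiftRight_distrib (a b k : Nat) : (a ^^^ b) >>> k = a >>> k ^^^ b >>> k := by
  apply Nat.eq_of_testBit_eq
  intro i
  simp [Nat.testBit_shiftRight, Nat.testBit_xor]

lemma mask15_small {y : Nat} (h : y < 32768) : y &&& 32767 = y := by
  have := Nat.and_two_pow_sub_one_eq_mod y 15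
  norm_num at this
  rw [this, Nat.mod_eq_of_lt h]

lemma mask4_small {y : Nat} (h : y < 16) : y &&& 15 = y := by
  have := Nat.and_two_pow_sub_one_eq_mod y 4
  norm_num at this
  rw [this, Nat.mod_eq_of_lt h]

lemma sr14_zero {lo : Nat} (h : lo < 16384) : lo >>> 14 = 0 := by
  rw [Nat.shiftRight_eq_div_pow]
  exact Nat.div_eq_of_lt (by norm_num; omega)

lemma shl_eq (lo k : Nat) : lo <<< k = lo * 2 ^ k := Nat.shiftLeft_eq lo k

lemma e15 : (2:Nat) ^ 15 = 32768 := by norm_num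

lemma e4 : (2:Nat) ^ 4 = 16 := by norm_num

lemma lt16_or {a b : Nat} (ha : a < 16) (hb : b < 16) : a ||| b < 16 :=
  e4 ▸ Nat.or_lt_two_pow (e4.symm ▸ ha) (e4.symm ▸ hb)

lemma lt16_xor {a b : Nat} (ha : a < 16) (hb : b < 16) : a ^^^ b < 16 :=
  e4 ▸ Nat.xor_lt_two_pow (e4.symm ▸ ha) (e4.symm ▸ hb)

lemma lt32768_xor {a b : Nat} (ha : a < 32768) (hb : b < 32768) : a ^^^ b < 32768 :=
  e15 ▸ Nat.xor_lt_two_pow (e15.symm ▸ ha) (e15.symm ▸ hb)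

lemma stepN_lt (x c : Nat) : stepN x c < 32768 := by
  unfold stepN
  have h1 : (x <<< 1) &&& 32767 < 32768 := by
    have := Nat.and_two_pow_sub_one_eq_mod (x <<< 1) 15
    norm_num at this
    rw [this]
    exact Nat.mod_lt _ (by norm_num)
  have h2 : (if ((x >>> 14) &&& 1) ^^^ c = 0 then 0 else 17817) < 32768 := by
    split <;> norm_num
  exact lt32768_xor h1 h2

-- one step is xor-linear in a low (bit-14-free) summand
lemma stepLin (u lo c : Nat) (h : lo < 16384) :
    stepN (u ^^^ lo) c = stepN u c ^^^ ((lo <<< 1) &&& 32767) := by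
  unfold stepN
  have h1 : ((u ^^^ lo) <<< 1) &&& 32767 = ((u <<< 1) &&& 32767) ^^^ ((lo <<< 1) &&& 32767) := by
    rw [xor_shiftLeft_distrib, Nat.and_xor_distrib_right]
  have h2 : ((u ^^^ lo) >>> 14) &&& 1 = (u >>> 14) &&& 1 := by
    rw [xor_shiftRight_distrib, Nat.and_xor_distrib_right, sr14_zero h]
    simp
  rw [h1, h2, Nat.xor_assoc, Nat.xor_comm ((lo <<< 1) &&& 32767), ← Nat.xor_assoc]

lemma shl1_mask {lo : Nat} (h : lo < 16384) : (lo <<< 1) &&& 32767 = 2 * lo := by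
  have : lo <<< 1 = 2 * lo := by rw [shl_eq]; ring
  rw [this, mask15_small (by omega)]

-- four steps are xor-linear in an 11-bit summand
lemma step4Lin (u lo c0 c1 c2 c3 : Nat) (h : lo < 2048) :
    stepN (stepN (stepN (stepN (u ^^^ lo) c0) c1) c2) c3
      = stepN (stepN (stepN (stepN u c0) c1) c2) c3 ^^^ (16 * lo) := by
  rw [stepLin u lo c0 (by omega), shl1_mask (by omega)]
  rw [stepLin _ (2 * lo) c1 (by omega), shl1_mask (by omega)]
  rw [stepLin _ (2 * (2 * lo)) c2 (by omega), shl1_mask (by omega)]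
  rw [stepLin _ (2 * (2 * (2 * lo))) c3 (by omega), shl1_mask (by omega)]
  ring_nf

-- the 256 base cases: table lookup = four explicit steps from an 11-bit-aligned state
def chk256 : Bool :=
  (List.range 16).all fun hi => (List.range 2).all fun c0 => (List.range 2).all fun c1 =>
    (List.range 2).all fun c2 => (List.range 2).all fun c3 =>
      tableN.getD ((hi ^^^ ((c0 <<< 3) ||| (c1 <<< 2) ||| (c2 <<< 1) ||| c3)) &&& 15) 0
        == stepN (stepN (stepN (stepN (2048 * hi) c0) c1) c2) c3

lemma chk256_true : chk256 = true := by decide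

lemma base256 {hi c0 c1 c2 c3 : Nat} (hhi : hi < 16) (h0 : c0 < 2) (h1 : c1 < 2) (h2 : c2 < 2) (h3 : c3 < 2) :
    tableN.getD ((hi ^^^ ((c0 <<< 3) ||| (c1 <<< 2) ||| (c2 <<< 1) ||| c3)) &&& 15) 0
      = stepN (stepN (stepN (stepN (2048 * hi) c0) c1) c2) c3 := by
  have h := chk256_true
  unfold chk256 at h
  simp only [List.all_eq_true, List.mem_range, beq_iff_eq] at h
  exact h hi hhi c0 h0 c1 h1 c2 h2 c3 h3

lemma split_x (x : Nat) : x = 2048 * (x >>> 11) ^^^ (x % 2048) := by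
  have hsr : x >>> 11 = x / 2048 := by rw [Nat.shiftRight_eq_div_pow]
  have hlo : x % 2048 < 2048 := Nat.mod_lt _ (by norm_num)
  have hsum : x = 2048 * (x >>> 11) + x % 2048 := by rw [hsr]; omega
  have hxor : 2048 * (x >>> 11) ^^^ (x % 2048) = 2048 * (x >>> 11) + x % 2048 := by
    apply Nat.eq_of_testBit_eq
    intro j
    have h2 : ((2:Nat) ^ 11 * (x >>> 11) + x % 2048).testBit j
        = if j < 11 then (x % 2048).testBit j else (x >>> 11).testBit (j - 11) :=
      Nat.testBit_two_pow_mul_add (x >>> 11) (by norm_num; omega) j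
    norm_num at h2
    rw [h2, Nat.testBit_xor]
    have hm : (2048 : Nat) * (x >>> 11) = (x >>> 11) <<< 11 := by rw [shl_eq]; ring
    rw [hm, Nat.testBit_shiftLeft]
    by_cases hj : j < 11
    · simp [hj, Nat.not_le.mpr hj]
    · have : (x % 2048).testBit j = false := by
        apply Nat.testBit_lt_two_pow
        calc x % 2048 < 2048 := Nat.mod_lt _ (by norm_num)
          _ = 2 ^ 11 := by norm_num
          _ ≤ 2 ^ j := Nat.pow_le_pow_right (by norm_num) (by omega)
      simp [this, hj, Nat.le_of_not_lt hj]
  omega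

lemma keyN (x c0 c1 c2 c3 : Nat) (hx : x < 32768) (h0 : c0 < 2) (h1 : c1 < 2) (h2 : c2 < 2) (h3 : c3 < 2) :
    nibStepN x ((c0 <<< 3) ||| (c1 <<< 2) ||| (c2 <<< 1) ||| c3)
      = stepN (stepN (stepN (stepN x c0) c1) c2) c3 := by
  set hi := x >>> 11 with hhi_def
  set lo := x % 2048 with hlo_def
  have hhi : hi < 16 := by
    rw [hhi_def, Nat.shiftRight_eq_div_pow]
    norm_num
    omega
  have hlo : lo < 2048 := Nat.mod_lt _ (by norm_num)
  have hx2 : x = 2048 * hi ^^^ lo := split_x x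
  set v := (c0 <<< 3) ||| (c1 <<< 2) ||| (c2 <<< 1) ||| c3 with hv_def
  have hv : v < 16 := by
    rw [hv_def]
    have t0 : c0 <<< 3 < 16 := by rw [shl_eq]; omega
    have t1 : c1 <<< 2 < 16 := by rw [shl_eq]; omega
    have t2 : c2 <<< 1 < 16 := by rw [shl_eq]; omega
    exact lt16_or (lt16_or (lt16_or t0 t1) t2) (by omega)
  -- left side
  have hshl : (x <<< 4) &&& 32767 = 16 * lo := by
    rw [hx2, xor_shiftLeft_distrib, Nat.and_xor_distrib_right]
    have e1 : ((2048 * hi) <<< 4) &&& 32767 = 0 := by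
      have : (2048 * hi) <<< 4 = 32768 * hi := by rw [shl_eq]; ring
      rw [this]
      have := Nat.and_two_pow_sub_one_eq_mod (32768 * hi) 15
      norm_num at this
      rw [this]
    have e2 : (lo <<< 4) &&& 32767 = 16 * lo := by
      have : lo <<< 4 = 16 * lo := by rw [shl_eq]; ring
      rw [this, mask15_small (by omega)]
    rw [e1, e2]
    simp
  have hidx : ((x >>> 11) ^^^ v) &&& 15 = hi ^^^ v := by
    rw [← hhi_def, mask4_small (lt16_xor hhi hv)]
  have hL : nibStepN x v = (16 * lo) ^^^ tableN.getD (hi ^^^ v) 0 := by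
    unfold nibStepN
    rw [hshl, hidx]
  -- right side
  have hR : stepN (stepN (stepN (stepN x c0) c1) c2) c3
      = stepN (stepN (stepN (stepN (2048 * hi) c0) c1) c2) c3 ^^^ (16 * lo) := by
    conv_lhs => rw [hx2]
    exact step4Lin _ _ _ _ _ _ hlo
  rw [hL, hR, ← base256 hhi h0 h1 h2 h3]
  rw [mask4_small (lt16_xor hhi hv), Nat.xor_comm]

-- ---- Int ↔ Nat bridges ----

lemma band1_cases (b : Int) : ∃ c : Nat, c < 2 ∧ PySem.Int.band b 1 = (c : Int) := by
  rw [PySem.Int.band_one]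
  have h0 := PySem.Int.mod_nonneg b (b := 2) (by norm_num)
  have h1 := PySem.Int.mod_lt b (b := 2) (by norm_num)
  refine ⟨(PySem.Int.mod b 2).toNat, by omega, by omega⟩

lemma band_small (c : Nat) (h : c < 2) : PySem.Int.band (c : Int) 1 = (c : Int) := by
  interval_cases c <;> decide

lemma stepA_parity (crc b : Int) {c : Nat} (hc : c < 2) (e : PySem.Int.band b 1 = (c : Int)) :
    pvStepA crc b = pvStepA crc (c : Int) := by
  unfold pvStepA
  rw [e, band_small c hc]

lemma stepA_bridge (x c : Nat) (hc : c < 2) : pvStepA (x : Int) (c : Int) = ((stepN x c : Nat) : Int) := by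
  have hc1 : c &&& 1 = c := by rw [Nat.and_one_is_mod, Nat.mod_eq_of_lt hc]
  unfold pvStepA stepN
  rw [show ((x : Int) >>> (14:Nat)) = ((x >>> 14 : Nat) : Int) from rfl,
      show ((x : Int) <<< (1:Nat)) = ((x <<< 1 : Nat) : Int) from rfl,
      show (1 : Int) = ((1 : Nat) : Int) from rfl,
      show (0x7FFF : Int) = ((32767 : Nat) : Int) from rfl,
      show (0x4599 : Int) = ((17817 : Nat) : Int) from rfl]
  simp only [PySem.Int.band_natCast, PySem.Int.bxor_natCast, hc1]
  by_cases h : ((x >>> 14) &&& 1) ^^^ c = 0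
  · rw [if_pos h]
    have h' : x >>> 14 % 2 = c := by rw [← Nat.and_one_is_mod]; exact Nat.xor_eq_zero_iff.mp h
    simp [h']
  · rw [if_neg h]
    have hpos : ((((x >>> 14) &&& 1) ^^^ c : Nat) : Int) ≠ 0 := by exact_mod_cast h
    rw [if_pos hpos]

lemma table_bridge (i : Nat) (h : i < 16) :
    PySem.List.pyGetD pvTable (i : Int) 0 = ((tableN.getD i 0 : Nat) : Int) := by
  interval_cases i <;> decide

lemma nib_parity (crc b0 b1 b2 b3 : Int) {c0 c1 c2 c3 : Nat}
    (h0 : c0 < 2) (h1 : c1 < 2) (h2 : c2 < 2) (h3 : c3 < 2)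
    (e0 : PySem.Int.band b0 1 = (c0 : Int)) (e1 : PySem.Int.band b1 1 = (c1 : Int))
    (e2 : PySem.Int.band b2 1 = (c2 : Int)) (e3 : PySem.Int.band b3 1 = (c3 : Int)) :
    pvNibStep crc b0 b1 b2 b3 = pvNibStep crc (c0 : Int) (c1 : Int) (c2 : Int) (c3 : Int) := by
  unfold pvNibStep
  rw [e0, e1, e2, e3, band_small c0 h0, band_small c1 h1, band_small c2 h2, band_small c3 h3]

lemma nib_bridge (x c0 c1 c2 c3 : Nat)
    (h0 : c0 < 2) (h1 : c1 < 2) (h2 : c2 < 2) (h3 : c3 < 2) :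
    pvNibStep (x : Int) (c0 : Int) (c1 : Int) (c2 : Int) (c3 : Int)
      = ((nibStepN x ((c0 <<< 3) ||| (c1 <<< 2) ||| (c2 <<< 1) ||| c3) : Nat) : Int) := by
  unfold pvNibStep nibStepN
  rw [band_small c0 h0, band_small c1 h1, band_small c2 h2, band_small c3 h3,
      show ((c0 : Int) <<< (3:Nat)) = ((c0 <<< 3 : Nat) : Int) from rfl,
      show ((c1 : Int) <<< (2:Nat)) = ((c1 <<< 2 : Nat) : Int) from rfl,
      show ((c2 : Int) <<< (1:Nat)) = ((c2 <<< 1 : Nat) : Int) from rfl,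
      show ((x : Int) <<< (4:Nat)) = ((x <<< 4 : Nat) : Int) from rfl,
      show ((x : Int) >>> (11:Nat)) = ((x >>> 11 : Nat) : Int) from rfl,
      show (0x7FFF : Int) = ((32767 : Nat) : Int) from rfl,
      show (0xF : Int) = ((15 : Nat) : Int) from rfl]
  simp only [PySem.Int.bor_natCast, PySem.Int.band_natCast, PySem.Int.bxor_natCast]
  rw [table_bridge _ (by
    have := Nat.and_two_pow_sub_one_eq_mod ((x >>> 11) ^^^ ((c0 <<< 3) ||| (c1 <<< 2) ||| (c2 <<< 1) ||| c3)) 4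
    norm_num at this
    rw [this]
    exact Nat.mod_lt _ (by norm_num))]
  simp only [PySem.Int.bxor_natCast]

lemma stepB_eq_stepA : pvStepB = pvStepA := rfl

lemma chunks_eq : ∀ (bits : List Int) (crc : Int),
    (∃ x : Nat, x < 32768 ∧ crc = (x : Int)) →
    pvChunks bits crc = bits.foldl pvStepA crc := by
  intro bits crc
  induction bits, crc using pvChunks.induct with
  | case1 b0 b1 b2 b3 rest crc ih =>
    rintro ⟨x, hx, rfl⟩
    obtain ⟨c0, h0, e0⟩ := band1_cases b0
    obtain ⟨c1, h1, e1⟩ := band1_cases b1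
    obtain ⟨c2, h2, e2⟩ := band1_cases b2
    obtain ⟨c3, h3, e3⟩ := band1_cases b3
    have hnext : pvNibStep (x : Int) b0 b1 b2 b3
        = ((stepN (stepN (stepN (stepN x c0) c1) c2) c3 : Nat) : Int) := by
      rw [nib_parity _ _ _ _ _ h0 h1 h2 h3 e0 e1 e2 e3, nib_bridge x c0 c1 c2 c3 h0 h1 h2 h3,
          keyN x c0 c1 c2 c3 hx h0 h1 h2 h3]
    have hfold : (b0 :: b1 :: b2 :: b3 :: rest).foldl pvStepA (x : Int)
        = rest.foldl pvStepA ((stepN (stepN (stepN (stepN x c0) c1) c2) c3 : Nat) : Int) := by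
      simp only [List.foldl_cons]
      congr 1
      rw [stepA_parity _ _ h0 e0, stepA_bridge x c0 h0,
          stepA_parity _ _ h1 e1, stepA_bridge _ c1 h1,
          stepA_parity _ _ h2 e2, stepA_bridge _ c2 h2,
          stepA_parity _ _ h3 e3, stepA_bridge _ c3 h3]
    calc pvChunks (b0 :: b1 :: b2 :: b3 :: rest) (x : Int)
        = pvChunks rest (pvNibStep (x : Int) b0 b1 b2 b3) := rfl
      _ = rest.foldl pvStepA (pvNibStep (x : Int) b0 b1 b2 b3) :=
          ih ⟨_, stepN_lt _ _, hnext⟩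
      _ = rest.foldl pvStepA ((stepN (stepN (stepN (stepN x c0) c1) c2) c3 : Nat) : Int) := by
          rw [hnext]
      _ = (b0 :: b1 :: b2 :: b3 :: rest).foldl pvStepA (x : Int) := hfold.symm
  | case2 rest crc h =>
    intro _
    rw [show pvChunks rest crc = rest.foldl pvStepB crc by
          unfold pvChunks
          match rest with
          | [] => rfl
          | [a] => rfl
          | [a, b] => rfl
          | [a, b, c] => rfl
          | a :: b :: c :: d :: t => exact absurd rfl (h a b c d t),
        stepB_eq_stepA]

-- ===== VERDICT (by name: the statement is the Claim_ definition above) =====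
theorem can_crc15_spec : Claim_equal_can_crc15 := by
  intro bits _
  unfold Spec_can_crc15 can_crc15 can_crc15_alt
  rw [chunks_eq bits 0 ⟨0, by omega, rfl⟩]
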